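-- pv_equiv track=rewrite | github.com/amirorfali/Dynamic-Risk-Dashboard | app/core/quantum_ae.py | _default_m_schedule
-- ===== SOURCE A (Python) =====
-- def _default_m_schedule(max_iter: int) -> list[int]:
--     """Powers of two for Grover iterations, bounded by max_iter."""
--     schedule: list[int] = []
--     m = 0
--     power = 1
--     while m <= max_iter:
--         schedule.append(m)
--         m = power
--         power *= 2
--     return schedule
-- ===== SOURCE B (Python) =====
-- def _default_m_schedule(max_iter: int) -> list[int]:
--     """Powers of two for Grover iterations, bounded by max_iter."""
--     if max_iter < 0:
--         return []
--     return [0] + [1 << k for k in range(max_iter.bit_length())]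
-- ===== Notes on version B (the rewrite author's own statement) =====
-- stated objective: idiomatic
-- what changed: Replaces the doubling while-loop with a closed-form schedule length via bit_length() and a comprehension generating the powers of two.
import Mathlib
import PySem

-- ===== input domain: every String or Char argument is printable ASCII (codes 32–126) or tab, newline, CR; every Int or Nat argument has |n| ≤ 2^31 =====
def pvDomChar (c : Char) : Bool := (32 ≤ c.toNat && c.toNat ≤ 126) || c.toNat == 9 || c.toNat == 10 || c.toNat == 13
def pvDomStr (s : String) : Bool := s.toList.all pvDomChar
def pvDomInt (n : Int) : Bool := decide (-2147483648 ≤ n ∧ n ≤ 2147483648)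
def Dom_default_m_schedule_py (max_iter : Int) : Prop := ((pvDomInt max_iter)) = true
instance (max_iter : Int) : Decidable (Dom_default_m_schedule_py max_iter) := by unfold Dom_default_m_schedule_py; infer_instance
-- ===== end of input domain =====

-- B replaces A's doubling-and-compare while loop with a closed-form schedule
-- length via bit_length() and a comprehension over the powers of two (idiomatic).

-- ===== PORT A =====
-- the while loop of A; the invariant 0 ≤ m < power justifies termination
def pyALoop (max_iter m power : Int) (schedule : List Int) (h : 0 ≤ m ∧ m < power) : List Int :=
  if _hm : m ≤ max_iter then
    pyALoop max_iter power (power * 2) (schedule ++ [m]) ⟨by omega, by omega⟩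
  else
    schedule
termination_by (max_iter + 1 - m).toNat
decreasing_by omega

def default_m_schedule_py (max_iter : Int) : List Int :=
  pyALoop max_iter 0 1 [] ⟨by omega, by omega⟩

-- ===== PORT B =====
-- Nat.size is Lean's counterpart of Python's int.bit_length(); 1 << k = 2^k
def default_m_schedule_py_alt (max_iter : Int) : List Int :=
  if max_iter < 0 then []
  else 0 :: (List.range (Nat.size max_iter.toNat)).map (fun k => (2 : Int) ^ k)

-- ===== PRECONDITION & SPEC =====
def Spec_default_m_schedule_py (max_iter : Int) (out : List Int) : Prop := out = default_m_schedule_py_alt max_iter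
instance (max_iter : Int) (out : List Int) : Decidable (Spec_default_m_schedule_py max_iter out) := by unfold Spec_default_m_schedule_py; infer_instance

-- ===== CLAIM (what is proved, stated in full; the proofs are below) =====
def Claim_equal_default_m_schedule_py : Prop := ∀ (max_iter : Int), Dom_default_m_schedule_py max_iter → Spec_default_m_schedule_py max_iter (default_m_schedule_py max_iter)

-- ===== LEMMAS AND PROOFS =====

-- A's loop started at m = 2^j, power = 2^(j+1) produces the tail of B's power list from index j
theorem pyALoop_eq_drop (n : Int) (hn : 0 ≤ n) (j : Nat) (acc : List Int)
    (h : 0 ≤ (2 : Int) ^ j ∧ (2 : Int) ^ j < (2 : Int) ^ (j + 1)) :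
    pyALoop n ((2 : Int) ^ j) ((2 : Int) ^ (j + 1)) acc h =
      acc ++ ((List.range (Nat.size n.toNat)).map (fun k => (2 : Int) ^ k)).drop j := by
  have hcast : ((2 ^ j : Nat) : Int) = (2 : Int) ^ j := by push_cast; ring
  have hiff : ((2 : Int) ^ j ≤ n) ↔ (2 ^ j ≤ n.toNat) := by
    rw [← hcast]; omega
  by_cases hj : (2 : Int) ^ j ≤ n
  · have hjlt : j < Nat.size n.toNat := Nat.lt_size.mpr (hiff.mp hj)
    rw [pyALoop, dif_pos hj]
    have hpow : (2 : Int) ^ (j + 1) * 2 = (2 : Int) ^ (j + 1 + 1) := by ring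
    rw [show (pyALoop n ((2:Int)^(j+1)) ((2:Int)^(j+1) * 2) (acc ++ [(2:Int)^j]) ⟨by omega, by omega⟩ : List Int) =
        pyALoop n ((2:Int)^(j+1)) ((2:Int)^(j+1+1)) (acc ++ [(2:Int)^j])
          ⟨by positivity, pow_lt_pow_right₀ one_lt_two (by omega)⟩ from by congr 1]
    rw [pyALoop_eq_drop n hn (j + 1) (acc ++ [(2 : Int) ^ j]) _]
    have hlen : j < ((List.range (Nat.size n.toNat)).map (fun k => (2 : Int) ^ k)).length := by
      simpa using hjlt
    rw [List.drop_eq_getElem_cons hlen]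
    simp [List.append_assoc]
  · have hjge : Nat.size n.toNat ≤ j := by
      by_contra hc
      exact hj (hiff.mpr (Nat.lt_size.mp (by omega)))
    rw [pyALoop, dif_neg hj]
    rw [List.drop_eq_nil_of_le (by simpa using hjge)]
    simp
termination_by Nat.size n.toNat - j
decreasing_by
  have : j < Nat.size n.toNat := Nat.lt_size.mpr (hiff.mp hj)
  omega

-- ===== VERDICT (by name: the statement is the Claim_ definition above) =====
theorem default_m_schedule_py_spec : Claim_equal_default_m_schedule_py := by
  intro n _
  unfold Spec_default_m_schedule_py default_m_schedule_py default_m_schedule_py_alt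
  by_cases hn : n < 0
  · rw [pyALoop, dif_neg (by omega), if_pos hn]
  · rw [if_neg hn]
    rw [pyALoop, dif_pos (by omega : (0 : Int) ≤ n)]
    have h0 : ((1 : Int) * 2) = (2 : Int) ^ (0 + 1) := by ring
    rw [show (pyALoop n 1 (1 * 2) ([] ++ [(0 : Int)]) ⟨by omega, by omega⟩ : List Int) =
        pyALoop n ((2 : Int) ^ 0) ((2 : Int) ^ (0 + 1)) [(0 : Int)] ⟨by norm_num, by norm_num⟩ from by congr 1]
    rw [pyALoop_eq_drop n (by omega) 0 [(0 : Int)]]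
    simp
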